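-- pv_equiv track=rewrite | github.com/jarrisonfor/DAW-Python | A-1.28/main.py | Salario
-- ===== SOURCE A (Python) =====
-- def Salario(horas, precio):
--     sueldo = 0
--     for i in range(1, horas + 1):
--         if i > 48:
--             sueldo += precio * 3
--         elif i > 40:
--             sueldo += precio * 2
--         elif i <= 40:
--             sueldo += precio
--     return sueldo
-- ===== SOURCE B (Python) =====
-- def Salario(horas, precio):
--     # Closed-form sum over the three hour brackets (O(1)).
--     base = max(0, min(horas, 40))
--     mid = max(0, min(horas, 48) - 40)
--     top = max(0, horas - 48)
--     return precio * (base + 2 * mid + 3 * top)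
-- ===== Notes on version B (the rewrite author's own statement) =====
-- stated objective: faster
-- what changed: Replaced the per-hour loop over range(1, horas+1) with a closed-form clamp of the hours into the three pay brackets (<=40, 41-48, >48).
import Mathlib
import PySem

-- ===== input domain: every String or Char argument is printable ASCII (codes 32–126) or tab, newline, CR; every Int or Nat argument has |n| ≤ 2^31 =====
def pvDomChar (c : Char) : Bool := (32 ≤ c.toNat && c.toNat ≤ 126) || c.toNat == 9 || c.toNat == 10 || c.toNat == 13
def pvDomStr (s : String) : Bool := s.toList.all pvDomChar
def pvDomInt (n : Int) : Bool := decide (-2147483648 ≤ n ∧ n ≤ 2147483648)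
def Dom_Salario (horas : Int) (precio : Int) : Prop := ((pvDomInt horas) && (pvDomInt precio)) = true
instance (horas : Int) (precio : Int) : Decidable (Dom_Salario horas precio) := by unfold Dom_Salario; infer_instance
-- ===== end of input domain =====

-- B replaces A's per-hour loop with closed-form arithmetic over the three pay brackets (objective: faster, O(1) vs O(horas)).


-- ===== PORT A =====
def Salario (horas : Int) (precio : Int) : Int :=
  (PySem.List.pyRange 1 (horas + 1) 1).foldl
    (fun sueldo i =>
      if i > 48 then sueldo + precio * 3
      else if i > 40 then sueldo + precio * 2
      else if i ≤ 40 then sueldo + precio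
      else sueldo) 0

-- ===== PORT B =====
def Salario_alt (horas : Int) (precio : Int) : Int :=
  let base := max 0 (min horas 40)
  let mid := max 0 (min horas 48 - 40)
  let top := max 0 (horas - 48)
  precio * (base + 2 * mid + 3 * top)

-- ===== PRECONDITION & SPEC =====
def Spec_Salario (horas : Int) (precio : Int) (out : Int) : Prop := out = Salario_alt horas precio
instance (horas : Int) (precio : Int) (out : Int) : Decidable (Spec_Salario horas precio out) := by unfold Spec_Salario; infer_instance

-- ===== CLAIM (what is proved, stated in full; the proofs are below) =====
def Claim_equal_Salario : Prop := ∀ (horas : Int) (precio : Int), Dom_Salario horas precio → Spec_Salario horas precio (Salario horas precio)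

-- ===== LEMMAS AND PROOFS =====

lemma Salario_alt_step (n : Int) (p : Int) (hn : 0 ≤ n) :
    Salario_alt (n + 1) p =
      Salario_alt n p + (if n + 1 > 48 then p * 3 else if n + 1 > 40 then p * 2 else p) := by
  unfold Salario_alt
  by_cases h1 : 48 ≤ n
  · rw [show max 0 (min (n+1) 40) = 40 by omega, show max 0 (min (n+1) 48 - 40) = 8 by omega,
        show max 0 (n+1-48) = n+1-48 by omega, show max 0 (min n 40) = 40 by omega,
        show max 0 (min n 48 - 40) = 8 by omega, show max 0 (n-48) = n-48 by omega,
        if_pos (by omega)]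
    ring
  · by_cases h2 : 40 ≤ n
    · rw [show max 0 (min (n+1) 40) = 40 by omega, show max 0 (min (n+1) 48 - 40) = n+1-40 by omega,
          show max 0 (n+1-48) = 0 by omega, show max 0 (min n 40) = 40 by omega,
          show max 0 (min n 48 - 40) = n-40 by omega, show max 0 (n-48) = 0 by omega,
          if_neg (by omega), if_pos (by omega)]
      ring
    · rw [show max 0 (min (n+1) 40) = n+1 by omega, show max 0 (min (n+1) 48 - 40) = 0 by omega,
          show max 0 (n+1-48) = 0 by omega, show max 0 (min n 40) = n by omega,
          show max 0 (min n 48 - 40) = 0 by omega, show max 0 (n-48) = 0 by omega,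
          if_neg (by omega), if_neg (by omega)]
      ring

lemma Salario_nat (p : Int) : ∀ k : Nat, Salario (k : Int) p = Salario_alt (k : Int) p := by
  intro k
  induction k with
  | zero =>
      simp [Salario, Salario_alt, PySem.List.pyRange_one_eq_nil]
  | succ k ih =>
      unfold Salario
      have hcast : ((k + 1 : Nat) : Int) + 1 = ((k : Int) + 1) + 1 := by push_cast; ring
      rw [hcast, PySem.List.pyRange_one_succ_right (by omega)]
      rw [List.foldl_append]
      have hA : (PySem.List.pyRange 1 ((k : Int) + 1) 1).foldl
          (fun sueldo i =>
            if i > 48 then sueldo + p * 3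
            else if i > 40 then sueldo + p * 2
            else if i ≤ 40 then sueldo + p
            else sueldo) 0 = Salario (k : Int) p := rfl
      rw [hA, ih]
      have hstep := Salario_alt_step (k : Int) p (by positivity)
      push_cast
      rw [hstep]
      simp only [List.foldl]
      by_cases h1 : (k : Int) + 1 > 48
      · rw [if_pos h1, if_pos h1]
      · rw [if_neg h1, if_neg h1]
        by_cases h2 : (k : Int) + 1 > 40
        · rw [if_pos h2, if_pos h2]
        · rw [if_neg h2, if_neg h2, if_pos (by omega)]

-- ===== VERDICT (by name: the statement is the Claim_ definition above) =====
theorem Salario_spec : Claim_equal_Salario := by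
  intro horas precio _
  unfold Spec_Salario
  by_cases h : 0 ≤ horas
  · have : horas = ((horas.toNat : Nat) : Int) := by omega
    rw [this, Salario_nat]
  · unfold Salario Salario_alt
    rw [PySem.List.pyRange_one_eq_nil (by omega), List.foldl_nil,
        show max 0 (min horas 40) = 0 by omega, show max 0 (min horas 48 - 40) = 0 by omega,
        show max 0 (horas - 48) = 0 by omega]
    ring
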